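-- pv_equiv track=rewrite | github.com/filakrad/adventOfCode | days/day15/code.py | upscale_data
-- ===== SOURCE A (Python) =====
-- def upscale_data(data):
--     part_upscaled = []
--     for d_row in data:
--         part_upscaled.append([((d+i-1) % 9) + 1 for i in range(5) for d in d_row])
--     upscaled = []
--     for i in range(5):
--         for d_row in part_upscaled:
--             upscaled.append([((d + i - 1) % 9) + 1 for d in d_row])
--     return upscaled
-- ===== SOURCE B (Python) =====
-- def upscale_data(data):
--     # Fused single pass: the two wraparound shifts compose, value = ((d+i+j-1) % 9) + 1.
--     return [[((d + i + j - 1) % 9) + 1 for j in range(5) for d in row]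
--             for i in range(5) for row in data]
-- ===== Notes on version B (the rewrite author's own statement) =====
-- stated objective: simpler
-- what changed: B fuses A's horizontal-then-vertical two-phase construction into one nested comprehension that computes each cell directly via ((d+i+j-1) % 9) + 1, dropping the intermediate part_upscaled buffer.
import Mathlib
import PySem

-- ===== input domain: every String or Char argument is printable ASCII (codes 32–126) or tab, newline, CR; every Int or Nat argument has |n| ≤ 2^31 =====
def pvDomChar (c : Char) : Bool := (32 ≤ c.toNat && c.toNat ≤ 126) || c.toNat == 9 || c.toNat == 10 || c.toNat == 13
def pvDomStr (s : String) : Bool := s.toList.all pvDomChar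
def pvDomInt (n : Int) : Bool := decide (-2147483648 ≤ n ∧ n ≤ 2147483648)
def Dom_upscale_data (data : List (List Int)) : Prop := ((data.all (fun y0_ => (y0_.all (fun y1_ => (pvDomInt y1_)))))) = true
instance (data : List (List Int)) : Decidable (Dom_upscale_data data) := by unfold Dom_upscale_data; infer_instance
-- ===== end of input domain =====

-- B fuses A's two-phase (horizontal then vertical) tiling into one pass computing each cell directly.

-- ===== PORT A =====
def upscale_data (data : List (List Int)) : List (List Int) :=
  let part_upscaled := data.foldl (fun acc d_row =>
    acc ++ [(PySem.List.pyRange 0 5 1).flatMap (fun i =>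
      d_row.map (fun d => PySem.Int.mod (d + i - 1) 9 + 1))]) []
  (PySem.List.pyRange 0 5 1).foldl (fun acc i =>
    part_upscaled.foldl (fun acc2 d_row =>
      acc2 ++ [d_row.map (fun d => PySem.Int.mod (d + i - 1) 9 + 1)]) acc) []

-- ===== PORT B =====
def upscale_data_alt (data : List (List Int)) : List (List Int) :=
  (PySem.List.pyRange 0 5 1).flatMap (fun i =>
    data.map (fun row =>
      (PySem.List.pyRange 0 5 1).flatMap (fun j =>
        row.map (fun d => PySem.Int.mod (d + i + j - 1) 9 + 1))))

-- ===== PRECONDITION & SPEC =====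
def Spec_upscale_data (data : List (List Int)) (out : List (List Int)) : Prop := out = upscale_data_alt data
instance (data : List (List Int)) (out : List (List Int)) : Decidable (Spec_upscale_data data out) := by unfold Spec_upscale_data; infer_instance

-- ===== CLAIM (what is proved, stated in full; the proofs are below) =====
def Claim_equal_upscale_data : Prop := ∀ (data : List (List Int)), Dom_upscale_data data → Spec_upscale_data data (upscale_data data)

-- ===== LEMMAS AND PROOFS =====

-- composing the two wraparound shifts: the second shift applied to an already-shifted cell
lemma mod_compose (d i j : Int) :
    PySem.Int.mod (PySem.Int.mod (d + j - 1) 9 + 1 + i - 1) 9 + 1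
      = PySem.Int.mod (d + i + j - 1) 9 + 1 := by
  rw [PySem.Int.mod_eq_emod_of_pos (by norm_num), PySem.Int.mod_eq_emod_of_pos (by norm_num),
      PySem.Int.mod_eq_emod_of_pos (by norm_num)]
  have : (d + j - 1) % 9 + 1 + i - 1 = (d + j - 1) % 9 + i := by ring
  rw [this, Int.emod_add_emod]
  ring_nf

theorem upscale_data_spec : Claim_equal_upscale_data := by
  intro data _
  unfold Spec_upscale_data upscale_data upscale_data_alt
  rw [PySem.List.foldl_append_singleton_eq_map, List.nil_append]
  have houter :
      (PySem.List.pyRange 0 5 1).foldl (fun acc i =>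
        (data.map (fun d_row => (PySem.List.pyRange 0 5 1).flatMap (fun j =>
          d_row.map (fun d => PySem.Int.mod (d + j - 1) 9 + 1)))).foldl (fun acc2 d_row =>
            acc2 ++ [d_row.map (fun d => PySem.Int.mod (d + i - 1) 9 + 1)]) acc) []
      = (PySem.List.pyRange 0 5 1).flatMap (fun i =>
          (data.map (fun d_row => (PySem.List.pyRange 0 5 1).flatMap (fun j =>
            d_row.map (fun d => PySem.Int.mod (d + j - 1) 9 + 1)))).map
              (fun d_row => d_row.map (fun d => PySem.Int.mod (d + i - 1) 9 + 1))) := by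
    have h1 : ∀ (i : Int) (acc : List (List Int)),
        (data.map (fun d_row => (PySem.List.pyRange 0 5 1).flatMap (fun j =>
          d_row.map (fun d => PySem.Int.mod (d + j - 1) 9 + 1)))).foldl (fun acc2 d_row =>
            acc2 ++ [d_row.map (fun d => PySem.Int.mod (d + i - 1) 9 + 1)]) acc
        = acc ++ (data.map (fun d_row => (PySem.List.pyRange 0 5 1).flatMap (fun j =>
            d_row.map (fun d => PySem.Int.mod (d + j - 1) 9 + 1)))).map
              (fun d_row => d_row.map (fun d => PySem.Int.mod (d + i - 1) 9 + 1)) := by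
      intro i acc; exact PySem.List.foldl_append_singleton_eq_map _ _ _
    calc (PySem.List.pyRange 0 5 1).foldl _ []
        = (PySem.List.pyRange 0 5 1).foldl (fun acc i => acc ++
            (data.map (fun d_row => (PySem.List.pyRange 0 5 1).flatMap (fun j =>
              d_row.map (fun d => PySem.Int.mod (d + j - 1) 9 + 1)))).map
                (fun d_row => d_row.map (fun d => PySem.Int.mod (d + i - 1) 9 + 1))) [] := by
          exact PySem.List.foldl_congr_mem _ _ _ _ (fun acc i _ => h1 i acc)
      _ = _ := by
          rw [PySem.List.foldl_append_eq_flatMap]; simp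
  rw [houter]
  congr 1
  funext i
  rw [List.map_map]
  congr 1
  funext d_row
  simp only [Function.comp, List.map_flatMap]
  congr 1
  funext j
  rw [List.map_map]
  congr 1
  funext d
  exact mod_compose d i j
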